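-- pv_equiv track=rewrite | github.com/keithwissing/adventofcode | 2017/day21.py | subimage_matches
-- ===== SOURCE A (Python) =====
-- def rotate(subimage):
--     return [[x for x in row] for row in zip(*subimage[::-1])]
--
-- def flip(subimage):
--     return subimage[::-1]
--
-- def subimage_matches(rule, subimage):
--     if len(rule) != len(subimage):
--         return False
--     erule = [[char for char in row] for row in rule]
--     if erule == subimage:
--         return True
--     for _ in range(3):
--         erule = rotate(erule)
--         if erule == subimage:
--             return True
--     erule = flip(erule)
--     if erule == subimage:
--         return True
--     for _ in range(3):
--         erule = rotate(erule)
--         if erule == subimage: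
--             return True
--     return False
-- ===== SOURCE B (Python) =====
-- def rotate(subimage):
--     return [[x for x in row] for row in zip(*subimage[::-1])]
--
--
-- def flip(subimage):
--     return subimage[::-1]
--
--
-- def _orientations(grid):
--     """All dihedral images of grid, as a set of tuple-of-tuples."""
--     seen = set()
--     g = [list(row) for row in grid]
--     for _ in range(4):
--         seen.add(tuple(tuple(row) for row in g))
--         g = rotate(g)
--     g = flip(g)
--     for _ in range(4):
--         seen.add(tuple(tuple(row) for row in g))
--         g = rotate(g)
--     return seen
--
--
-- def subimage_matches(rule, subimage):
--     if len(rule) != len(subimage):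
--         return False
--     return _orientations(rule) == _orientations(subimage)
-- ===== Notes on version B (the rewrite author's own statement) =====
-- stated objective: alternative
-- what changed: A walks rule through its 8 orientations one at a time with an early-exit comparison against subimage and never transforms subimage; B computes the full orientation set (orbit) of BOTH grids as sets of tuple-of-tuples and returns whether the two orbits are equal, relying on the group property that two square grids are related by a rotation/flip iff their dihedral orbits coincide. Pre_ excludes only equal-length pairs whose rule grid is non-square, where rotate's zip silently truncates rule's rows and A's results are accidents of its transform order.
-- outside the precondition, e.g. on subimage_matches([['b', 'a'], ['b']], [['b'], ['b']]): A returns True, B returns False; on subimage_matches([['a', 'b'], ['a']], [['x'], ['y']]): A returns False, B returns False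
import Mathlib
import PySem

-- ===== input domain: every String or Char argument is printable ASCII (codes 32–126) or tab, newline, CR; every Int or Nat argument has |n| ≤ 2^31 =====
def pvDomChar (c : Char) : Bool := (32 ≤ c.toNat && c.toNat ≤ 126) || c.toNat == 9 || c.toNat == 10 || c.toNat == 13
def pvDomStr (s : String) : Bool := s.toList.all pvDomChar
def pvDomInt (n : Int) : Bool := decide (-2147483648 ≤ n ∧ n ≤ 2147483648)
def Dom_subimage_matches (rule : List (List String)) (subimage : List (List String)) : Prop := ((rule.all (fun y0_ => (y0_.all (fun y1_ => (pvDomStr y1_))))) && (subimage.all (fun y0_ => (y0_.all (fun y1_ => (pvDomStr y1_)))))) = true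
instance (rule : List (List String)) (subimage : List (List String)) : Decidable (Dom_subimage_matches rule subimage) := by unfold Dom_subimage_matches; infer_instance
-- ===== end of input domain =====

-- B replaces A's transform-rule-and-compare-with-early-exit scan by computing the dihedral
-- orientation set (orbit) of BOTH grids and comparing the two orbits as sets (alternative, not faster).

-- ===== PORT A =====
-- zip(*rows): truncating transpose (tuples become lists); exact model of Python's zip of lists
def pyZipAll (rows : List (List String)) : List (List String) :=
  if rows.isEmpty then []
  else (List.range (((rows.map List.length).min?).getD 0)).map
    (fun j => rows.map (fun r => r.getD j ""))

-- rotate(subimage) = [[x for x in row] for row in zip(*subimage[::-1])]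
-- (subimage[::-1] is List.reverse, per PySem.List.slice?_none_none_neg_one)
def pyRotate (g : List (List String)) : List (List String) :=
  (pyZipAll g.reverse).map (fun row => row.map (fun x => x))

-- flip(subimage) = subimage[::-1]
def pyFlip (g : List (List String)) : List (List String) := g.reverse

def subimage_matches (rule : List (List String)) (subimage : List (List String)) : Bool :=
  if rule.length ≠ subimage.length then false
  else
    let erule := rule.map (fun row => row.map (fun ch => ch))
    if erule = subimage then true
    else
      let s1 := (List.range 3).foldl
        (fun (s : List (List String) × Bool) _ =>
          if s.2 then s else
            let e := pyRotate s.1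
            (e, decide (e = subimage))) (erule, false)
      if s1.2 then true
      else
        let e4 := pyFlip s1.1
        if e4 = subimage then true
        else
          ((List.range 3).foldl
            (fun (s : List (List String) × Bool) _ =>
              if s.2 then s else
                let e := pyRotate s.1
                (e, decide (e = subimage))) (e4, false)).2

-- ===== PORT B =====
-- _orientations(grid): the 8 dihedral images of grid collected into a set
def orientations (grid : List (List String)) : PySem.Set (List (List String)) :=
  let g0 := grid.map (fun row => row.map (fun x => x))
  let p1 := (List.range 4).foldl
    (fun (p : List (List String) × PySem.Set (List (List String))) _ =>
      (pyRotate p.1, PySem.Set.add p.2 p.1)) (g0, PySem.Set.empty)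
  let g4 := pyFlip p1.1
  let p2 := (List.range 4).foldl
    (fun (p : List (List String) × PySem.Set (List (List String))) _ =>
      (pyRotate p.1, PySem.Set.add p.2 p.1)) (g4, p1.2)
  p2.2

def subimage_matches_alt (rule : List (List String)) (subimage : List (List String)) : Bool :=
  if rule.length ≠ subimage.length then false
  else PySem.Set.equal (orientations rule) (orientations subimage)

-- ===== PRECONDITION & SPEC =====
def squareb (g : List (List String)) : Bool := g.all (fun row => row.length == g.length)

-- Pre_ excludes only pairs whose RULE is a non-square grid of the same length as subimage: there
-- rotate's zip silently truncates rule's rows, so what A compares against subimage is an accident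
-- of its transform order.
def Pre_subimage_matches (rule : List (List String)) (subimage : List (List String)) : Prop :=
  rule.length = subimage.length → squareb rule = true
instance (rule : List (List String)) (subimage : List (List String)) : Decidable (Pre_subimage_matches rule subimage) := by unfold Pre_subimage_matches; infer_instance

def pvWitness_subimage_matches : List (List String) × List (List String) :=
  ([["a", "b"], ["c", "d"]], [["c", "a"], ["d", "b"]])

def Spec_subimage_matches (rule : List (List String)) (subimage : List (List String)) (out : Bool) : Prop := out = subimage_matches_alt rule subimage
instance (rule : List (List String)) (subimage : List (List String)) (out : Bool) : Decidable (Spec_subimage_matches rule subimage out) := by unfold Spec_subimage_matches; infer_instance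

-- ===== CLAIM (what is proved, stated in full; the proofs are below) =====
def Claim_equal_subimage_matches : Prop := ∀ (rule : List (List String)) (subimage : List (List String)), Dom_subimage_matches rule subimage → Pre_subimage_matches rule subimage → Spec_subimage_matches rule subimage (subimage_matches rule subimage)

-- ===== LEMMAS AND PROOFS =====
-- Proof idea: on square grids rotate/flip generate the dihedral group (rot4, flip_rot below), so
-- A's walk visits exactly the orbit NL rule, and two orbits are equal as sets iff one grid lies
-- in the orbit of the other (orbit_mem_eq).

def mkG (n : Nat) (F : Nat → Nat → String) : List (List String) :=
  (List.range n).map (fun i => (List.range n).map (fun j => F i j))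

def gfF (g : List (List String)) : Nat → Nat → String := fun i j => (g.getD i []).getD j ""

def Sq (n : Nat) (g : List (List String)) : Prop := g.length = n ∧ ∀ row ∈ g, row.length = n

lemma grid_eq_mk {n : Nat} {g : List (List String)} (h : Sq n g) : g = mkG n (gfF g) := by
  obtain ⟨hlen, hrows⟩ := h
  apply List.ext_getElem
  · simp [mkG, hlen]
  · intro i h1 h2
    simp only [mkG, List.getElem_map, List.getElem_range]
    apply List.ext_getElem
    · simp only [gfF, List.length_map, List.length_range]
      exact hrows g[i] (List.getElem_mem _)
    · intro j h3 h4
      simp only [List.getElem_map, List.getElem_range, gfF]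
      rw [List.getD_eq_getElem?_getD, List.getD_eq_getElem?_getD]
      rw [List.getElem?_eq_getElem h1]
      simp only [Option.getD_some]
      rw [List.getElem?_eq_getElem h3]
      simp

lemma flip_mk (n : Nat) (F : Nat → Nat → String) :
    pyFlip (mkG n F) = mkG n (fun a b => F (n - 1 - a) b) := by
  unfold pyFlip
  apply List.ext_getElem
  · simp [mkG]
  · intro i h1 h2
    rw [List.getElem_reverse]
    simp only [mkG, List.length_map, List.length_range] at h1 h2 ⊢
    simp only [List.getElem_map, List.getElem_range]

lemma min?_all_eq {l : List Nat} {n : Nat} (hne : l ≠ []) (h : ∀ x ∈ l, x = n) :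
    l.min?.getD 0 = n := by
  induction l with
  | nil => simp at hne
  | cons a t ih =>
    rcases t with _ | ⟨b, t'⟩
    · simp [List.min?, h a (by simp)]
    · rw [List.min?_cons]
      simp only [Option.getD_some]
      have ha := h a (by simp)
      have hmin : (b :: t').min?.getD 0 = n := ih (by simp) (fun x hx => h x (by simp [hx]))
      cases hm : (b :: t').min?
      · simp at hm
      · simp only [hm, Option.getD_some] at hmin
        simp [ha, hmin]

lemma rotate_mk (n : Nat) (F : Nat → Nat → String) :
    pyRotate (mkG n F) = mkG n (fun a b => F (n - 1 - b) a) := by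
  rcases Nat.eq_zero_or_pos n with rfl | hn
  · rfl
  · unfold pyRotate pyZipAll
    have hne : (mkG n F).reverse.isEmpty = false := by
      simp [mkG]
      omega
    rw [hne]
    simp only [Bool.false_eq_true, if_false]
    have hmin : (((mkG n F).reverse.map List.length).min?).getD 0 = n := by
      apply min?_all_eq
      · simp [mkG]; omega
      · intro x hx
        simp only [List.map_reverse, List.mem_reverse, List.mem_map] at hx
        obtain ⟨row, hrow, rfl⟩ := hx
        simp [mkG] at hrow
        obtain ⟨i, _, rfl⟩ := hrow
        simp
    rw [hmin]
    apply List.ext_getElem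
    · simp [mkG]
    · intro a h1 h2
      simp only [List.getElem_map, List.getElem_range]
      apply List.ext_getElem
      · simp [mkG]
      · intro b h3 h4
        simp only [List.getElem_map, List.getElem_reverse]
        simp only [List.length_map, List.length_range] at h1
        simp only [List.length_map, List.length_reverse] at h3
        simp only [mkG, List.length_map, List.length_range] at h3 ⊢
        simp only [List.getElem_map, List.getElem_range]
        rw [List.getD_eq_getElem?_getD, List.getElem?_eq_getElem (by simp; omega)]
        simp only [Option.getD_some, List.getElem_map, List.getElem_range]

lemma sq_mk (n : Nat) (F : Nat → Nat → String) : Sq n (mkG n F) := by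
  constructor
  · simp [mkG]
  · intro row hrow
    simp [mkG] at hrow
    obtain ⟨i, _, rfl⟩ := hrow
    simp

lemma mk_congr {n : Nat} {F G' : Nat → Nat → String}
    (h : ∀ i < n, ∀ j < n, F i j = G' i j) : mkG n F = mkG n G' := by
  unfold mkG
  apply List.map_congr_left
  intro i hi
  apply List.map_congr_left
  intro j hj
  exact h i (List.mem_range.mp hi) j (List.mem_range.mp hj)

lemma sq_rotate {n : Nat} {g : List (List String)} (h : Sq n g) : Sq n (pyRotate g) := by
  rw [grid_eq_mk h, rotate_mk]; exact sq_mk n _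

lemma sq_flip {n : Nat} {g : List (List String)} (h : Sq n g) : Sq n (pyFlip g) := by
  rw [grid_eq_mk h, flip_mk]; exact sq_mk n _

lemma pyFlip_pyFlip (g : List (List String)) : pyFlip (pyFlip g) = g := by
  simp [pyFlip]

lemma rot4 {n : Nat} {g : List (List String)} (h : Sq n g) :
    pyRotate (pyRotate (pyRotate (pyRotate g))) = g := by
  conv_lhs => rw [grid_eq_mk h]
  rw [rotate_mk, rotate_mk, rotate_mk, rotate_mk]
  conv_rhs => rw [grid_eq_mk h]
  apply mk_congr
  intro i hi j hj
  congr 1 <;> omega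

lemma flip_rot {n : Nat} {g : List (List String)} (h : Sq n g) :
    pyFlip (pyRotate g) = pyRotate (pyRotate (pyRotate (pyFlip g))) := by
  conv_lhs => rw [grid_eq_mk h]
  conv_rhs => rw [grid_eq_mk h]
  rw [rotate_mk, flip_mk, flip_mk, rotate_mk, rotate_mk, rotate_mk]
  apply mk_congr
  intro i hi j hj
  congr 1
  omega

def NL (g : List (List String)) : List (List (List String)) :=
  [g, pyRotate g, pyRotate (pyRotate g), pyRotate (pyRotate (pyRotate g)),
   pyFlip g, pyRotate (pyFlip g), pyRotate (pyRotate (pyFlip g)),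
   pyRotate (pyRotate (pyRotate (pyFlip g)))]

lemma mem_NL_self (g : List (List String)) : g ∈ NL g := by simp [NL]

lemma mem_NL_rotate {n : Nat} {g : List (List String)} (h : Sq n g) (x : List (List String)) :
    x ∈ NL (pyRotate g) ↔ x ∈ NL g := by
  simp only [NL, flip_rot h, rot4 h, rot4 (sq_flip h), List.mem_cons, List.not_mem_nil, or_false]
  tauto

lemma mem_NL_flip {n : Nat} {g : List (List String)} (_h : Sq n g) (x : List (List String)) :
    x ∈ NL (pyFlip g) ↔ x ∈ NL g := by
  simp only [NL, pyFlip_pyFlip, List.mem_cons, List.not_mem_nil, or_false]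
  tauto

lemma orbit_mem_eq {n : Nat} {g h : List (List String)} (hg : Sq n g)
    (hmem : h ∈ NL g) (x : List (List String)) : x ∈ NL h ↔ x ∈ NL g := by
  simp only [NL, List.mem_cons, List.not_mem_nil, or_false] at hmem
  rcases hmem with rfl | rfl | rfl | rfl | rfl | rfl | rfl | rfl
  · exact Iff.rfl
  · exact mem_NL_rotate hg x
  · rw [mem_NL_rotate (sq_rotate hg), mem_NL_rotate hg]
  · rw [mem_NL_rotate (sq_rotate (sq_rotate hg)), mem_NL_rotate (sq_rotate hg), mem_NL_rotate hg]
  · exact mem_NL_flip hg x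
  · rw [mem_NL_rotate (sq_flip hg), mem_NL_flip hg]
  · rw [mem_NL_rotate (sq_rotate (sq_flip hg)), mem_NL_rotate (sq_flip hg), mem_NL_flip hg]
  · rw [mem_NL_rotate (sq_rotate (sq_rotate (sq_flip hg))),
        mem_NL_rotate (sq_rotate (sq_flip hg)), mem_NL_rotate (sq_flip hg), mem_NL_flip hg]

lemma foldl3 (g s : List (List String)) :
    (List.range 3).foldl (fun (st : List (List String) × Bool) _ =>
        if st.2 then st else
          let e := pyRotate st.1
          (e, decide (e = s))) (g, false)
    = if pyRotate g = s then (pyRotate g, true)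
      else if pyRotate (pyRotate g) = s then (pyRotate (pyRotate g), true)
      else (pyRotate (pyRotate (pyRotate g)),
            decide (pyRotate (pyRotate (pyRotate g)) = s)) := by
  simp only [show List.range 3 = [0, 1, 2] from rfl, List.foldl]
  by_cases h1 : pyRotate g = s <;> by_cases h2 : pyRotate (pyRotate g) = s <;>
    simp [h1, h2]

lemma A_eq_mem {n : Nat} {rule s : List (List String)} (hlen : rule.length = s.length)
    (hsq : Sq n rule) : subimage_matches rule s = decide (s ∈ NL rule) := by
  have herule : rule.map (fun row => row.map (fun ch => ch)) = rule := by simp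
  have e4eq : pyFlip (pyRotate (pyRotate (pyRotate rule))) = pyRotate (pyFlip rule) := by
    rw [flip_rot (sq_rotate (sq_rotate hsq)), flip_rot (sq_rotate hsq), flip_rot hsq,
      rot4 (sq_flip hsq), rot4 (sq_flip hsq)]
  have htr : ∀ (a : List (List String)), ((a, true) : List (List String) × Bool).2 = true :=
    fun _ => rfl
  unfold subimage_matches
  rw [if_neg (by simpa using hlen)]
  simp only [herule, foldl3, NL, List.mem_cons, List.not_mem_nil, or_false]
  by_cases h0 : rule = s
  · rw [if_pos h0]
    symm; rw [decide_eq_true_eq]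
    exact Or.inl h0.symm
  rw [if_neg h0]
  by_cases h1 : pyRotate rule = s
  · rw [if_pos h1, if_pos (htr _)]
    symm; rw [decide_eq_true_eq]
    exact Or.inr (Or.inl h1.symm)
  rw [if_neg h1]
  by_cases h2 : pyRotate (pyRotate rule) = s
  · rw [if_pos h2, if_pos (htr _)]
    symm; rw [decide_eq_true_eq]
    exact Or.inr (Or.inr (Or.inl h2.symm))
  rw [if_neg h2]
  simp only []
  by_cases h3 : pyRotate (pyRotate (pyRotate rule)) = s
  · rw [if_pos (decide_eq_true h3)]
    symm; rw [decide_eq_true_eq]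
    exact Or.inr (Or.inr (Or.inr (Or.inl h3.symm)))
  simp only [decide_eq_false h3, Bool.false_eq_true, if_false, e4eq]
  by_cases h4 : pyRotate (pyFlip rule) = s
  · rw [if_pos h4]
    symm; rw [decide_eq_true_eq]
    exact Or.inr (Or.inr (Or.inr (Or.inr (Or.inr (Or.inl h4.symm)))))
  rw [if_neg h4]
  by_cases h5 : pyRotate (pyRotate (pyFlip rule)) = s
  · rw [if_pos h5, htr]
    symm; rw [decide_eq_true_eq]
    exact Or.inr (Or.inr (Or.inr (Or.inr (Or.inr (Or.inr (Or.inl h5.symm))))))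
  rw [if_neg h5]
  by_cases h6 : pyRotate (pyRotate (pyRotate (pyFlip rule))) = s
  · rw [if_pos h6, htr]
    symm; rw [decide_eq_true_eq]
    exact Or.inr (Or.inr (Or.inr (Or.inr (Or.inr (Or.inr (Or.inr h6.symm))))))
  rw [if_neg h6]
  simp only []
  rw [rot4 (sq_flip hsq)]
  by_cases h7 : pyFlip rule = s
  · rw [decide_eq_true h7]
    symm; rw [decide_eq_true_eq]
    exact Or.inr (Or.inr (Or.inr (Or.inr (Or.inl h7.symm))))
  · rw [decide_eq_false h7, decide_eq_false]
    rintro (rfl | rfl | rfl | rfl | rfl | rfl | rfl | rfl)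
    · exact h0 rfl
    · exact h1 rfl
    · exact h2 rfl
    · exact h3 rfl
    · exact h7 rfl
    · exact h4 rfl
    · exact h5 rfl
    · exact h6 rfl

lemma B_orient {n : Nat} {g : List (List String)} (h : Sq n g) :
    orientations g = PySem.Set.ofList (NL g) := by
  have hg0 : g.map (fun row => row.map (fun x => x)) = g := by simp
  unfold orientations
  simp only [hg0, show List.range 4 = [0, 1, 2, 3] from rfl, List.foldl]
  rw [rot4 h]
  rw [PySem.Set.ofList_eq_foldl]
  simp only [NL, List.foldl]
  rfl

lemma mem_orientations_self (g : List (List String)) : g ∈ orientations g := by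
  have hg0 : g.map (fun row => row.map (fun x => x)) = g := by simp
  unfold orientations
  simp only [hg0, show List.range 4 = [0, 1, 2, 3] from rfl, List.foldl]
  simp [PySem.Set.mem_add]

lemma squareb_iff (g : List (List String)) : squareb g = true ↔ Sq g.length g := by
  simp [squareb, Sq]

lemma sq_NL_mem {n : Nat} {g x : List (List String)} (hg : Sq n g) (hx : x ∈ NL g) : Sq n x := by
  simp only [NL, List.mem_cons, List.not_mem_nil, or_false] at hx
  rcases hx with rfl | rfl | rfl | rfl | rfl | rfl | rfl | rfl
  · exact hg
  · exact sq_rotate hg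
  · exact sq_rotate (sq_rotate hg)
  · exact sq_rotate (sq_rotate (sq_rotate hg))
  · exact sq_flip hg
  · exact sq_rotate (sq_flip hg)
  · exact sq_rotate (sq_rotate (sq_flip hg))
  · exact sq_rotate (sq_rotate (sq_rotate (sq_flip hg)))

-- ===== VERDICT (by name: the statement is the Claim_ definition above) =====
theorem subimage_matches_spec : Claim_equal_subimage_matches := by
  intro rule s _ hpre
  unfold Spec_subimage_matches
  by_cases hlen : rule.length = s.length
  · have hr : Sq rule.length rule := (squareb_iff rule).mp (hpre hlen)
    rw [A_eq_mem hlen hr]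
    rw [show subimage_matches_alt rule s
        = PySem.Set.equal (orientations rule) (orientations s) from by
      unfold subimage_matches_alt
      rw [if_neg (by simpa using hlen)]]
    by_cases hsqs : squareb s = true
    case neg =>
      -- subimage is not square, so it lies in neither orbit of square grids
      have hnm : ¬ s ∈ NL rule := fun hm => hsqs ((squareb_iff s).mpr (by
        have := sq_NL_mem hr hm
        rwa [hlen] at this))
      rw [decide_eq_false hnm]
      symm
      rw [Bool.eq_false_iff]
      intro hEq
      rw [PySem.Set.equal_iff] at hEq
      have h1 : s ∈ orientations rule := (hEq s).mpr (mem_orientations_self s)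
      rw [B_orient hr, PySem.Set.mem_ofList] at h1
      exact hnm h1
    have hs : Sq rule.length s := by
      have := (squareb_iff s).mp hsqs
      rwa [← hlen] at this
    rw [B_orient hr, B_orient hs]
    by_cases hm : s ∈ NL rule
    · rw [decide_eq_true hm]
      symm
      rw [PySem.Set.equal_iff]
      intro x
      rw [PySem.Set.mem_ofList, PySem.Set.mem_ofList]
      exact (orbit_mem_eq hr hm x).symm
    · rw [decide_eq_false hm]
      symm
      rw [Bool.eq_false_iff]
      intro hEq
      rw [PySem.Set.equal_iff] at hEq
      have := (hEq s).mpr (by rw [PySem.Set.mem_ofList]; exact mem_NL_self s)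
      rw [PySem.Set.mem_ofList] at this
      exact hm this
  · unfold subimage_matches subimage_matches_alt
    rw [if_pos hlen, if_pos hlen]
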